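-- pv_equiv track=rewrite | github.com/Jack200133/LAB_Final | labD/newpostfix.py | metacharacters
-- ===== SOURCE A (Python) =====
-- def metacharacters(regex):
--     deleteIdempotencia = ["*","+"]
--     for symbol in deleteIdempotencia:
--         end = ''
--         espList = metahelper(regex)
--         i =0
--         for i in range(len(espList)):
--             if espList[i] == symbol and end == symbol:
--                 end = symbol
--                 espList[i] = ''
--             else:
--                 end = espList[i]
--         regex = ''.join(espList)
--     return regex
--
-- def metahelper(regex):
--     newRegex = []
--     i =0
--     while i < len(regex):
--         element = regex[i]
--         if element == '\\' and i+1 < len(regex) and regex[i+1] != '\\':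
--             newRegex.append(regex[i])
--             newRegex.append(regex[i+1])
--             i+=1
--         else:
--             newRegex.append(element)
--         i+=1
--     return newRegex
-- ===== SOURCE B (Python) =====
-- def metacharacters(regex):
--     out = []
--     prev = ''
--     for c in regex:
--         if c in '*+' and c == prev:
--             continue
--         out.append(c)
--         prev = c
--     return ''.join(out)
-- ===== Notes on version B (the rewrite author's own statement) =====
-- stated objective: simpler
-- what changed: Replaced the two per-symbol passes (each re-tokenizing via metahelper, which in fact just rebuilds the character list) with one direct scan over the characters that drops a '*' or '+' equal to the previously kept character.
import Mathlib
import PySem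

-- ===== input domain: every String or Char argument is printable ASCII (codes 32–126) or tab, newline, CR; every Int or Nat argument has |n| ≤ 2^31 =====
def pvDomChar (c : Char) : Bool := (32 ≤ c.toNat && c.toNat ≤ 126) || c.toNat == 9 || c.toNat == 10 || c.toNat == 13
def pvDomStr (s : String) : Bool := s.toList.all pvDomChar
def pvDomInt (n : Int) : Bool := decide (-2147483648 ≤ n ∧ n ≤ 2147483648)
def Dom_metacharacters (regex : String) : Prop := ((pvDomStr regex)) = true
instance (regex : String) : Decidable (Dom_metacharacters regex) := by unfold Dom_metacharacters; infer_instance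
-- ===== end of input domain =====

-- B collapses runs of '*'/'+' in ONE character scan instead of A's two per-symbol passes that each
-- re-tokenize via metahelper; same return value for every input (objective: simpler).

-- ===== PORT A =====
-- metahelper's while loop (appends regex[i], and on an escape also regex[i+1], advancing past both)
def pvMetahelperLoop (s : List Char) (i : Nat) : List String :=
  if _h : i < s.length then
    if s.getD i default = '\\' ∧ i + 1 < s.length ∧ s.getD (i+1) default ≠ '\\' then
      String.ofList [s.getD i default] :: String.ofList [s.getD (i+1) default] :: pvMetahelperLoop s (i+2)
    else
      String.ofList [s.getD i default] :: pvMetahelperLoop s (i+1)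
  else []
termination_by s.length - i

def pvMetahelper (regex : String) : List String := pvMetahelperLoop regex.toList 0

-- the inner 'for i in range(len(espList))' loop: writes '' over a symbol repeated w.r.t. end
def pvPassLoop (symbol : String) : List String → String → List String
  | [], _ => []
  | t :: ts, e =>
    if t = symbol ∧ e = symbol then "" :: pvPassLoop symbol ts symbol
    else t :: pvPassLoop symbol ts t

def metacharacters (regex : String) : String :=
  ["*", "+"].foldl
    (fun r symbol => PySem.Str.join "" (pvPassLoop symbol (pvMetahelper r) "")) regex

-- ===== PORT B =====
-- Source B's single scan; prev is '' or the last kept character as a 1-char string, as in Source B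
def pvAltLoop : List Char → String → List Char
  | [], _ => []
  | c :: cs, prev =>
    if (c = '*' ∨ c = '+') ∧ String.ofList [c] = prev then pvAltLoop cs prev
    else c :: pvAltLoop cs (String.ofList [c])

def metacharacters_alt (regex : String) : String :=
  String.ofList (pvAltLoop regex.toList "")

-- ===== PRECONDITION & SPEC =====
def Spec_metacharacters (regex : String) (out : String) : Prop := out = metacharacters_alt regex
instance (regex : String) (out : String) : Decidable (Spec_metacharacters regex out) := by unfold Spec_metacharacters; infer_instance

-- ===== CLAIM (what is proved, stated in full; the proofs are below) =====
def Claim_equal_metacharacters : Prop := ∀ (regex : String), Dom_metacharacters regex → Spec_metacharacters regex (metacharacters regex)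

-- ===== LEMMAS AND PROOFS =====

-- run-collapser at the character level: drop c when S c and c equals the previously kept char
def pvCollapse (S : Char → Bool) : List Char → Option Char → List Char
  | [], _ => []
  | c :: cs, p => if S c ∧ p = some c then pvCollapse S cs p else c :: pvCollapse S cs (some c)

def pvPrevStr : Option Char → String
  | none => ""
  | some c => String.ofList [c]

theorem pvOfList_inj (a b : List Char) : String.ofList a = String.ofList b ↔ a = b := by
  constructor
  · intro h; have := congrArg String.toList h; simpa using this
  · intro h; rw [h]

theorem pvPrevStr_eq_iff (p : Option Char) (c : Char) :
    pvPrevStr p = String.ofList [c] ↔ p = some c := by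
  cases p with
  | none =>
    simp only [pvPrevStr]
    constructor
    · intro h; have := congrArg String.toList h; simp at this
    · intro h; cases h
  | some d => simp [pvPrevStr, pvOfList_inj]

theorem pvJoin_cons (x : String) (l : List String) :
    (PySem.Str.join "" (x :: l)).toList = x.toList ++ (PySem.Str.join "" l).toList := by
  simp only [PySem.Str.join, PySem.Chars.join, List.map_cons, String.toList_ofList]
  cases l.map String.toList <;> simp [List.intercalate, List.intersperse]

theorem pvMetahelperLoop_eq (s : List Char) (i : Nat) :
    pvMetahelperLoop s i = (s.drop i).map (fun c => String.ofList [c]) := by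
  rw [pvMetahelperLoop]
  split
  · rename_i h
    have hd : s.drop i = s.getD i default :: s.drop (i+1) := by
      rw [List.getD_eq_getElem s default h, List.getElem_cons_drop]
    split
    · rename_i hc
      have hd2 : s.drop (i+1) = s.getD (i+1) default :: s.drop (i+2) := by
        rw [List.getD_eq_getElem s default hc.2.1, List.getElem_cons_drop]
      rw [pvMetahelperLoop_eq s (i+2), hd, hd2]; simp
    · rw [pvMetahelperLoop_eq s (i+1), hd]; simp
  · rename_i h
    rw [List.drop_eq_nil_of_le (by omega)]; simp
termination_by s.length - i

theorem pvPassLoop_eq (sym : Char) (cs : List Char) (p : Option Char) :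
    (PySem.Str.join "" (pvPassLoop (String.ofList [sym]) (cs.map (fun c => String.ofList [c])) (pvPrevStr p))).toList
      = pvCollapse (· == sym) cs p := by
  induction cs generalizing p with
  | nil => simp [pvPassLoop, pvCollapse, PySem.Str.join, PySem.Chars.join, List.intercalate]
  | cons c cs ih =>
    simp only [List.map_cons, pvPassLoop, pvCollapse]
    by_cases hc : (c == sym) = true ∧ p = some c
    · obtain ⟨h1, h2⟩ := hc
      have hcs : c = sym := by simpa using h1
      subst hcs; subst h2
      rw [if_pos ⟨rfl, (pvPrevStr_eq_iff _ _).mpr rfl⟩, if_pos ⟨by simp, rfl⟩, pvJoin_cons]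
      have := ih (some c)
      simp only [pvPrevStr] at this
      rw [this]; simp
    · have hcond : ¬(String.ofList [c] = String.ofList [sym] ∧ pvPrevStr p = String.ofList [sym]) := by
        rintro ⟨ha, hb⟩
        have hcs : c = sym := by simpa using (pvOfList_inj _ _).mp ha
        subst hcs
        exact hc ⟨by simp, (pvPrevStr_eq_iff _ _).mp hb⟩
      rw [if_neg hcond, if_neg hc, pvJoin_cons]
      have := ih (some c)
      simp only [pvPrevStr] at this
      rw [this]; simp

theorem pvPassLoop_eq0 (sym : Char) (cs : List Char) :
    (PySem.Str.join "" (pvPassLoop (String.ofList [sym]) (cs.map (fun c => String.ofList [c])) "")).toList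
      = pvCollapse (· == sym) cs none := pvPassLoop_eq sym cs none

theorem pvCollapse_compose (S1 S2 : Char → Bool) (cs : List Char) (p : Option Char) :
    pvCollapse S2 (pvCollapse S1 cs p) p = pvCollapse (fun c => S1 c || S2 c) cs p := by
  induction cs generalizing p with
  | nil => simp [pvCollapse]
  | cons c cs ih =>
    simp only [pvCollapse]
    by_cases h1 : S1 c = true ∧ p = some c
    · rw [if_pos h1, if_pos ⟨by simp [h1.1], h1.2⟩, ih]
    · rw [if_neg h1]
      simp only [pvCollapse]
      by_cases h2 : S2 c = true ∧ p = some c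
      · rw [if_pos h2, if_pos ⟨by simp [h2.1], h2.2⟩, h2.2, ih]
      · rw [if_neg h2, if_neg (by
          rintro ⟨ho, hp⟩
          rcases Bool.or_eq_true_iff.mp ho with h | h
          · exact h1 ⟨h, hp⟩
          · exact h2 ⟨h, hp⟩), ih]

theorem pvAltLoop_eq (cs : List Char) (p : Option Char) :
    pvAltLoop cs (pvPrevStr p) = pvCollapse (fun c => c == '*' || c == '+') cs p := by
  induction cs generalizing p with
  | nil => simp [pvAltLoop, pvCollapse]
  | cons c cs ih =>
    simp only [pvAltLoop, pvCollapse]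
    have hcond : ((c = '*' ∨ c = '+') ∧ String.ofList [c] = pvPrevStr p)
        ↔ ((c == '*' || c == '+') = true ∧ p = some c) := by
      constructor
      · rintro ⟨h1, h2⟩
        exact ⟨by simpa using h1, (pvPrevStr_eq_iff _ _).mp h2.symm⟩
      · rintro ⟨h1, h2⟩
        exact ⟨by simpa using h1, ((pvPrevStr_eq_iff _ _).mpr h2).symm⟩
    by_cases hc : ((c == '*' || c == '+') = true ∧ p = some c)
    · rw [if_pos (hcond.mpr hc), if_pos hc, hc.2, ih]
    · rw [if_neg (fun h => hc (hcond.mp h)), if_neg hc]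
      have := ih (some c)
      simp only [pvPrevStr] at this
      rw [this]

theorem pvAltLoop_eq0 (cs : List Char) :
    pvAltLoop cs "" = pvCollapse (fun c => c == '*' || c == '+') cs none := pvAltLoop_eq cs none

theorem pvMetahelper_eq (r : String) :
    pvMetahelper r = r.toList.map (fun c => String.ofList [c]) := by
  unfold pvMetahelper; rw [pvMetahelperLoop_eq]; rfl

-- ===== VERDICT (by name: the statement is the Claim_ definition above) =====
theorem metacharacters_spec : Claim_equal_metacharacters := by
  intro regex _
  unfold Spec_metacharacters metacharacters metacharacters_alt
  simp only [List.foldl_cons, List.foldl_nil]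
  set r1 := PySem.Str.join "" (pvPassLoop "*" (pvMetahelper regex) "") with hr1
  have hstar : ("*" : String) = String.ofList ['*'] := by decide
  have hplus : ("+" : String) = String.ofList ['+'] := by decide
  have h1 : r1.toList = pvCollapse (· == '*') regex.toList none := by
    rw [hr1, pvMetahelper_eq, hstar, pvPassLoop_eq0]
  have h2 : (PySem.Str.join "" (pvPassLoop "+" (pvMetahelper r1) "")).toList
      = pvAltLoop regex.toList "" := by
    rw [pvMetahelper_eq, h1, hplus, pvPassLoop_eq0, pvCollapse_compose, ← pvAltLoop_eq0]
  calc PySem.Str.join "" (pvPassLoop "+" (pvMetahelper r1) "")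
      = String.ofList (PySem.Str.join "" (pvPassLoop "+" (pvMetahelper r1) "")).toList := by
        rw [String.ofList_toList]
    _ = String.ofList (pvAltLoop regex.toList "") := by rw [h2]
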